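-- pv_equiv track=rewrite | github.com/AndersonVidal/Programming | URI/paradigmas/1590.py | getBigAnd
-- ===== SOURCE A (Python) =====
-- def getBigAnd(k, array):
--   res = 0
--   for i in range(30,-1,-1):
--     andBit = 1 << i
--     count = 0
--     j = 0
--     aux = []
--     while j < len(array):
--       if array[j] & andBit:
--         count += 1
--         aux.append(array[j])
--       j += 1
--
--     if count >= k:
--       res += andBit
--       array = aux
--
--   return res
-- ===== SOURCE B (Python) =====
-- def getBigAnd(k, array):
--   # Keep the original array; grow a single bit mask greedily from the high bit:
--   # commit bit i when at least k elements contain ALL committed bits plus bit i.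
--   res = 0
--   for i in range(30, -1, -1):
--     candidate = res | (1 << i)
--     if sum(1 for x in array if x & candidate == candidate) >= k:
--       res = candidate
--   return res
-- ===== Notes on version B (the rewrite author's own statement) =====
-- stated objective: simpler
-- what changed: Instead of maintaining a progressively shrinking auxiliary list (rebuilt with an index-driven while loop and appends each pass), B keeps the original array untouched and maintains only the accumulated bit mask, counting in one comprehension the elements that contain all committed bits plus the candidate bit.
import Mathlib
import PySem

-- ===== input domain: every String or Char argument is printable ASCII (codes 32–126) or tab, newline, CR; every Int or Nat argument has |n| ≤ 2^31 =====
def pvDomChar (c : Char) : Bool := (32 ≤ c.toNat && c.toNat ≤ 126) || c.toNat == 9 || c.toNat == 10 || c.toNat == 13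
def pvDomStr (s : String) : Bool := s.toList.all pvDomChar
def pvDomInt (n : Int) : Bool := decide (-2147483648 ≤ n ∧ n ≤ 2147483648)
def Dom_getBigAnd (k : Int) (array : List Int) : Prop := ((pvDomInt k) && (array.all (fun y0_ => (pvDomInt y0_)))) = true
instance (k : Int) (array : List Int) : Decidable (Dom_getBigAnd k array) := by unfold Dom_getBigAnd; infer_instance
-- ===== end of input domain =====

-- B keeps the original array and only grows a bit mask, instead of A's shrinking auxiliary list;
-- the return values agree on every input (A never raises). Same asymptotic cost, simpler state.

-- ===== PORT A =====
-- body of A's `for i in range(30,-1,-1)` loop: state = (res, array)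
def getBigAndStep (k : Int) (st : Int × List Int) (i : Int) : Int × List Int :=
  let andBit : Int := (1 : Int) <<< i.toNat      -- `1 << i`; every i produced by the range is ≥ 0, so .toNat is exact
  -- `while j < len(array)` walks the list front to back accumulating (count, aux)
  let ca := st.2.foldl (fun (p : Int × List Int) x =>
      if PySem.Int.band x andBit ≠ 0 then (p.1 + 1, p.2 ++ [x]) else p) ((0 : Int), ([] : List Int))
  if k ≤ ca.1 then (st.1 + andBit, ca.2) else (st.1, st.2)

def getBigAnd (k : Int) (array : List Int) : Int :=
  ((PySem.List.pyRange 30 (-1) (-1)).foldl (getBigAndStep k) (0, array)).1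

-- ===== PORT B =====
-- body of B's loop: state = res only; counts against the whole original array
def getBigAndAltStep (k : Int) (array : List Int) (res : Int) (i : Int) : Int :=
  let candidate := PySem.Int.bor res (1 <<< i.toNat)
  if k ≤ ((array.countP (fun x => PySem.Int.band x candidate == candidate) : Nat) : Int) then candidate else res

def getBigAnd_alt (k : Int) (array : List Int) : Int :=
  (PySem.List.pyRange 30 (-1) (-1)).foldl (getBigAndAltStep k array) 0

-- ===== PRECONDITION & SPEC =====
def Spec_getBigAnd (k : Int) (array : List Int) (out : Int) : Prop := out = getBigAnd_alt k array
instance (k : Int) (array : List Int) (out : Int) : Decidable (Spec_getBigAnd k array out) := by unfold Spec_getBigAnd; infer_instance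

-- ===== CLAIM (what is proved, stated in full; the proofs are below) =====
def Claim_equal_getBigAnd : Prop := ∀ (k : Int) (array : List Int), Dom_getBigAnd k array → Spec_getBigAnd k array (getBigAnd k array)

-- ===== LEMMAS AND PROOFS =====

-- ---- Nat-level bit arithmetic ----

theorem pvNat_sub_and_eq_xor : ∀ (m : Nat), ∀ s : Nat, s &&& m = s → m - s = m ^^^ s := by
  intro m
  induction m using Nat.strong_induction_on with
  | _ m ih =>
    intro s h
    rcases Nat.eq_zero_or_pos m with hm | hm
    · subst hm
      have : s = 0 := by rw [← h, Nat.and_zero]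
      simp [this]
    · have hlt : m / 2 < m := Nat.div_lt_self hm (by omega)
      have hh : (s / 2) &&& (m / 2) = s / 2 := by
        rw [← Nat.and_div_two, h]
      have ihs := ih (m / 2) hlt (s / 2) hh
      have hdiv : (m ^^^ s) / 2 = m / 2 ^^^ s / 2 := Nat.xor_div_two
      have hmod : (m ^^^ s) % 2 = (m + s) % 2 := Nat.xor_mod_two_eq
      have hbit : s % 2 = 1 → m % 2 = 1 := by
        intro h1
        have : (s &&& m) % 2 = 1 := by rw [h]; exact h1
        exact (Nat.and_mod_two_eq_one.mp this).2
      have hle : s / 2 ≤ m / 2 := hh ▸ Nat.and_le_right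
      omega

theorem pvNat_or_eq_add : ∀ (m : Nat), ∀ n : Nat, m &&& n = 0 → m ||| n = m + n := by
  intro m
  induction m using Nat.strong_induction_on with
  | _ m ih =>
    intro n h
    rcases Nat.eq_zero_or_pos m with hm | hm
    · subst hm; simp
    · have hlt : m / 2 < m := Nat.div_lt_self hm (by omega)
      have hh : (m / 2) &&& (n / 2) = 0 := by
        rw [← Nat.and_div_two, h]
      have ihs := ih (m / 2) hlt (n / 2) hh
      have hdiv : (m ||| n) / 2 = m / 2 ||| n / 2 := Nat.or_div_two
      have hmod : (m ||| n) % 2 = 1 ↔ m % 2 = 1 ∨ n % 2 = 1 := Nat.or_mod_two_eq_one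
      have hand : ¬ (m % 2 = 1 ∧ n % 2 = 1) := by
        intro hc
        have : (m &&& n) % 2 = 1 := Nat.and_mod_two_eq_one.mpr hc
        omega
      omega

theorem pvNat_sub_and_testBit (m n j : Nat) :
    (m - (m &&& n)).testBit j = (m.testBit j && !(n.testBit j)) := by
  have hsub : (m &&& n) &&& m = m &&& n := by
    apply Nat.eq_of_testBit_eq
    intro i
    simp only [Nat.testBit_and]
    cases m.testBit i <;> cases n.testBit i <;> rfl
  have hx := pvNat_sub_and_eq_xor m (m &&& n) hsub
  rw [hx]
  simp only [Nat.testBit_xor, Nat.testBit_and]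
  cases m.testBit j <;> cases n.testBit j <;> rfl

-- ---- Int.testBit characterisation of PySem.Int.band / bor ----

theorem pvTb_natCast (n : Nat) (j : Nat) : (Int.testBit (n : Int) j) = n.testBit j := rfl

theorem pvTb_negSucc' (x : Nat) (j : Nat) : Int.testBit (-(x : Int) - 1) j = !(x.testBit j) := by
  have : (-(x : Int) - 1) = Int.negSucc x := by rw [Int.negSucc_eq]; ring
  rw [this]
  rfl

theorem pvTb_of_nonneg (a : Int) (h : 0 ≤ a) (j : Nat) : a.testBit j = a.toNat.testBit j := by
  cases a with
  | ofNat m => rfl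
  | negSucc m => exact absurd h (by exact of_decide_eq_false rfl)

theorem pvTb_of_neg (a : Int) (h : a < 0) (j : Nat) : a.testBit j = !((-a - 1).toNat.testBit j) := by
  cases a with
  | ofNat m => exact absurd h (by simp)
  | negSucc m =>
    have : (-(Int.negSucc m) - 1).toNat = m := by
      rw [Int.negSucc_eq]
      simp
    rw [this]
    rfl

theorem pvTb_band (a b : Int) (j : Nat) :
    (PySem.Int.band a b).testBit j = (a.testBit j && b.testBit j) := by
  unfold PySem.Int.band
  split_ifs with ha hb hb
  · rw [pvTb_natCast, Nat.testBit_and, pvTb_of_nonneg a ha, pvTb_of_nonneg b hb]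
  · rw [pvTb_natCast, pvNat_sub_and_testBit, pvTb_of_nonneg a ha, pvTb_of_neg b (by omega)]
  · rw [pvTb_natCast, pvNat_sub_and_testBit, pvTb_of_nonneg b hb, pvTb_of_neg a (by omega)]
    cases (b.toNat.testBit j) <;> cases ((-a - 1).toNat.testBit j) <;> rfl
  · rw [pvTb_negSucc', Nat.testBit_or, pvTb_of_neg a (by omega), pvTb_of_neg b (by omega)]
    cases ((-a - 1).toNat.testBit j) <;> cases ((-b - 1).toNat.testBit j) <;> rfl

theorem pvTb_bor (a b : Int) (j : Nat) :
    (PySem.Int.bor a b).testBit j = (a.testBit j || b.testBit j) := by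
  unfold PySem.Int.bor
  split_ifs with ha hb hb
  · rw [pvTb_natCast, Nat.testBit_or, pvTb_of_nonneg a ha, pvTb_of_nonneg b hb]
  · rw [pvTb_negSucc', pvNat_sub_and_testBit, pvTb_of_nonneg a ha, pvTb_of_neg b (by omega)]
    cases (a.toNat.testBit j) <;> cases ((-b - 1).toNat.testBit j) <;> rfl
  · rw [pvTb_negSucc', pvNat_sub_and_testBit, pvTb_of_nonneg b hb, pvTb_of_neg a (by omega)]
    cases (b.toNat.testBit j) <;> cases ((-a - 1).toNat.testBit j) <;> rfl
  · rw [pvTb_negSucc', Nat.testBit_and, pvTb_of_neg a (by omega), pvTb_of_neg b (by omega)]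
    cases ((-a - 1).toNat.testBit j) <;> cases ((-b - 1).toNat.testBit j) <;> rfl

theorem pvInt_eq_of_testBit_eq {a b : Int} (h : ∀ j, a.testBit j = b.testBit j) : a = b := by
  cases a with
  | ofNat m =>
    cases b with
    | ofNat n =>
      have : m = n := Nat.eq_of_testBit_eq (fun i => h i)
      rw [this]
    | negSucc n =>
      exfalso
      have hk := h (m + n + 1)
      have hm : m.testBit (m + n + 1) = false :=
        Nat.testBit_eq_false_of_lt (lt_of_lt_of_le Nat.lt_two_pow_self (Nat.pow_le_pow_right (by omega) (by omega)))
      have hn : n.testBit (m + n + 1) = false :=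
        Nat.testBit_eq_false_of_lt (lt_of_lt_of_le Nat.lt_two_pow_self (Nat.pow_le_pow_right (by omega) (by omega)))
      rw [show (Int.ofNat m).testBit (m + n + 1) = m.testBit (m + n + 1) from rfl,
          show (Int.negSucc n).testBit (m + n + 1) = !(n.testBit (m + n + 1)) from rfl, hm, hn] at hk
      simp at hk
  | negSucc m =>
    cases b with
    | ofNat n =>
      exfalso
      have hk := h (m + n + 1)
      have hm : m.testBit (m + n + 1) = false :=
        Nat.testBit_eq_false_of_lt (lt_of_lt_of_le Nat.lt_two_pow_self (Nat.pow_le_pow_right (by omega) (by omega)))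
      have hn : n.testBit (m + n + 1) = false :=
        Nat.testBit_eq_false_of_lt (lt_of_lt_of_le Nat.lt_two_pow_self (Nat.pow_le_pow_right (by omega) (by omega)))
      rw [show (Int.negSucc m).testBit (m + n + 1) = !(m.testBit (m + n + 1)) from rfl,
          show (Int.ofNat n).testBit (m + n + 1) = n.testBit (m + n + 1) from rfl, hm, hn] at hk
      simp at hk
    | negSucc n =>
      have : m = n := Nat.eq_of_testBit_eq (fun i => Bool.not_inj (h i))
      rw [this]

theorem pvTb_zero (j : Nat) : Int.testBit 0 j = false := Nat.zero_testBit j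

theorem pvTb_pow (n j : Nat) : ((1 : Int) <<< n).testBit j = decide (n = j) := by
  have h1 : ((1 : Int) <<< n) = ((1 <<< n : Nat) : Int) := rfl
  rw [h1, pvTb_natCast, Nat.one_shiftLeft, Nat.testBit_two_pow]

-- `x & c == c` says: every bit of c is a bit of x
theorem pvBand_eq_iff (x c : Int) :
    PySem.Int.band x c = c ↔ ∀ j, c.testBit j = true → x.testBit j = true := by
  constructor
  · intro h j hc
    have := congrArg (fun t => Int.testBit t j) h
    simp only [pvTb_band] at this
    rw [hc] at this
    cases hx : x.testBit j
    · rw [hx] at this; simp at this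
    · rfl
  · intro h
    apply pvInt_eq_of_testBit_eq
    intro j
    rw [pvTb_band]
    cases hc : c.testBit j
    · simp
    · rw [h j hc]; rfl

-- `x & (1 << n)` is zero or the power itself, according to bit n of x
theorem pvBandPow_eq_zero_iff (x : Int) (n : Nat) :
    PySem.Int.band x ((1 : Int) <<< n) = 0 ↔ x.testBit n = false := by
  constructor
  · intro h
    have := congrArg (fun t => Int.testBit t n) h
    simp only [pvTb_band, pvTb_pow, pvTb_zero] at this
    cases hx : x.testBit n
    · rfl
    · rw [hx] at this; simp at this
  · intro h
    apply pvInt_eq_of_testBit_eq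
    intro j
    rw [pvTb_band, pvTb_pow, pvTb_zero]
    by_cases hj : n = j
    · subst hj; rw [h]; rfl
    · simp [hj]

-- pointwise: membership in B's mask test = A's bit test conjoined with the running filter
theorem pvPointwise (x r : Int) (n : Nat) :
    (PySem.Int.band x (PySem.Int.bor r ((1 : Int) <<< n)) = PySem.Int.bor r ((1 : Int) <<< n))
      ↔ (PySem.Int.band x ((1 : Int) <<< n) ≠ 0 ∧ PySem.Int.band x r = r) := by
  rw [pvBand_eq_iff, pvBand_eq_iff]
  constructor
  · intro h
    constructor
    · rw [Ne, pvBandPow_eq_zero_iff]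
      have := h n (by rw [pvTb_bor, pvTb_pow]; simp)
      rw [this]; simp
    · intro j hj
      exact h j (by rw [pvTb_bor, hj]; rfl)
  · rintro ⟨h1, h2⟩ j hj
    rw [pvTb_bor] at hj
    rw [Bool.or_eq_true] at hj
    rcases hj with hr | hp
    · exact h2 j hr
    · rw [pvTb_pow, decide_eq_true_eq] at hp
      rw [Ne, pvBandPow_eq_zero_iff] at h1
      rw [← hp]
      cases hx : x.testBit n
      · exact absurd hx h1
      · rfl

-- A's inner while loop returns (count, filter)
theorem pvInner (b : Int) : ∀ (arr : List Int) (c0 : Int) (l0 : List Int),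
    arr.foldl (fun (p : Int × List Int) x =>
      if PySem.Int.band x b ≠ 0 then (p.1 + 1, p.2 ++ [x]) else p) (c0, l0)
    = (c0 + ((arr.countP (fun x => !(PySem.Int.band x b == 0)) : Nat) : Int),
       l0 ++ arr.filter (fun x => !(PySem.Int.band x b == 0))) := by
  intro arr
  induction arr with
  | nil => intro c0 l0; simp
  | cons y ys ih =>
    intro c0 l0
    simp only [List.foldl_cons, List.countP_cons, List.filter_cons]
    by_cases hy : PySem.Int.band y b ≠ 0
    · rw [if_pos hy]
      have hb : (!(PySem.Int.band y b == 0)) = true := by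
        simp [hy]
      rw [ih, hb]
      simp only [Prod.mk.injEq, if_true]
      refine ⟨by push_cast; ring, by simp⟩
    · rw [if_neg hy]
      have hb : (!(PySem.Int.band y b == 0)) = false := by
        simp at hy; simp [hy]
      rw [ih, hb]
      simp

-- one power of two is disjoint from the committed mask grown from other powers
theorem pvDisjoint_grow (res : Int) (n m : Nat) (hres : PySem.Int.band res ((1 : Int) <<< m) = 0)
    (hne : n ≠ m) : PySem.Int.band (PySem.Int.bor res ((1 : Int) <<< n)) ((1 : Int) <<< m) = 0 := by
  apply pvInt_eq_of_testBit_eq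
  intro j
  rw [pvTb_band, pvTb_bor, pvTb_pow, pvTb_pow, pvTb_zero]
  by_cases hj : m = j
  · subst hj
    have h1 : res.testBit m = false := (pvBandPow_eq_zero_iff res m).mp hres
    rw [h1]
    simp [hne]
  · simp [hj]

-- or of the committed mask with a fresh power = A's addition
theorem pvOrAdd (res : Int) (n : Nat) (hnn : 0 ≤ res)
    (hdisj : PySem.Int.band res ((1 : Int) <<< n) = 0) :
    PySem.Int.bor res ((1 : Int) <<< n) = res + (1 : Int) <<< n := by
  have hp : ((1 : Int) <<< n) = ((1 <<< n : Nat) : Int) := rfl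
  have hpn : (0 : Int) ≤ (1 : Int) <<< n := by rw [hp]; positivity
  rw [PySem.Int.bor_of_nonneg hnn hpn]
  rw [PySem.Int.band_of_nonneg hnn hpn] at hdisj
  have hz : res.toNat &&& ((1 : Int) <<< n).toNat = 0 := by exact_mod_cast hdisj
  rw [pvNat_or_eq_add _ _ hz]
  omega

-- main loop invariant: A's (res, shrinking list) tracks B's bare mask
theorem pvLoop (k : Int) (orig : List Int) : ∀ (bs : List Int) (res : Int) (arr : List Int),
    0 ≤ res →
    (∀ j ∈ bs, PySem.Int.band res ((1 : Int) <<< j.toNat) = 0) →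
    bs.Pairwise (fun a b => a.toNat ≠ b.toNat) →
    arr = orig.filter (fun x => PySem.Int.band x res == res) →
    (bs.foldl (getBigAndStep k) (res, arr)).1 = bs.foldl (getBigAndAltStep k orig) res := by
  intro bs
  induction bs with
  | nil => intro res arr _ _ _ _; rfl
  | cons i is ih =>
    intro res arr hnn hdisj hpw harr
    simp only [List.foldl_cons]
    have hpw' := (List.pairwise_cons.mp hpw)
    set n := i.toNat with hn
    set b : Int := (1 : Int) <<< n with hb
    set c : Int := PySem.Int.bor res b with hc
    have hdi : PySem.Int.band res b = 0 := hdisj i (List.mem_cons_self)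
    have hcount : (arr.countP (fun x => !(PySem.Int.band x b == 0)) : Nat)
        = orig.countP (fun x => PySem.Int.band x c == c) := by
      rw [harr, List.countP_filter]
      apply List.countP_congr
      intro x _
      simp only [Bool.and_eq_true, Bool.not_eq_true', beq_iff_eq, beq_eq_false_iff_ne]
      rw [pvPointwise x res n]
    have hfilter : arr.filter (fun x => !(PySem.Int.band x b == 0))
        = orig.filter (fun x => PySem.Int.band x c == c) := by
      rw [harr, List.filter_filter]
      apply List.filter_congr
      intro x _
      rw [Bool.eq_iff_iff]
      simp only [Bool.and_eq_true, Bool.not_eq_true', beq_iff_eq, beq_eq_false_iff_ne]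
      rw [pvPointwise x res n]
    have hstepA : getBigAndStep k (res, arr) i
        = if k ≤ ((orig.countP (fun x => PySem.Int.band x c == c) : Nat) : Int)
          then (res + b, orig.filter (fun x => PySem.Int.band x c == c)) else (res, arr) := by
      unfold getBigAndStep
      simp only
      rw [pvInner b arr 0 []]
      simp only [zero_add, List.nil_append, hcount, hfilter]
      rfl
    have hstepB : getBigAndAltStep k orig res i
        = if k ≤ ((orig.countP (fun x => PySem.Int.band x c == c) : Nat) : Int) then c else res := by
      unfold getBigAndAltStep
      rfl
    rw [hstepA, hstepB]
    by_cases hk : k ≤ ((orig.countP (fun x => PySem.Int.band x c == c) : Nat) : Int)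
    · rw [if_pos hk, if_pos hk]
      have hcadd : c = res + b := pvOrAdd res n hnn hdi
      rw [← hcadd]
      apply ih c _ (by
        rw [hcadd]
        have hbp : (0:Int) ≤ b := by
          rw [hb, show ((1 : Int) <<< n) = ((1 <<< n : Nat) : Int) from rfl]; positivity
        omega) _ hpw'.2 rfl
      intro j hj
      exact pvDisjoint_grow res n j.toNat (hdisj j (List.mem_cons_of_mem i hj)) (fun he => hpw'.1 j hj he)
    · rw [if_neg hk, if_neg hk]
      exact ih res arr hnn (fun j hj => hdisj j (List.mem_cons_of_mem i hj)) hpw'.2 harr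

-- ===== VERDICT (by name: the statement is the Claim_ definition above) =====
theorem getBigAnd_spec : Claim_equal_getBigAnd := by
  intro k array _
  unfold Spec_getBigAnd getBigAnd getBigAnd_alt
  apply pvLoop k array (PySem.List.pyRange 30 (-1) (-1)) 0 array (le_refl 0)
  · intro j _
    rw [PySem.Int.band_comm]
    exact PySem.Int.band_zero _
  · decide
  · have : ∀ x : Int, (PySem.Int.band x 0 == 0) = true := by
      intro x
      simp [PySem.Int.band_zero]
    rw [List.filter_congr (fun x _ => this x), List.filter_true]
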